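-- pv_equiv track=rewrite | github.com/danibassetto/PythonListasExercicio | pythonProjectAvaliação/Avaliação_ProgramaçãoS2/av02.py | validaEntrada
-- ===== SOURCE A (Python) =====
-- def validaEntrada(n):
--     n = str(n)
--     if len(n) == 4:
--         for i in n:
--             if n.count(i) > 3:
--                 return False
--         return True
--     else:
--         return False
-- ===== SOURCE B (Python) =====
-- def validaEntrada(n):
--     s = str(n)
--     return len(s) == 4 and len(set(s)) != 1
-- ===== Notes on version B (the rewrite author's own statement) =====
-- stated objective: simpler
-- what changed: Replaced the per-character loop with count>3 early-returns by a single closed-form test: length 4 and the set of characters has size != 1 (in a 4-char string count>3 means all characters equal).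
import Mathlib
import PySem

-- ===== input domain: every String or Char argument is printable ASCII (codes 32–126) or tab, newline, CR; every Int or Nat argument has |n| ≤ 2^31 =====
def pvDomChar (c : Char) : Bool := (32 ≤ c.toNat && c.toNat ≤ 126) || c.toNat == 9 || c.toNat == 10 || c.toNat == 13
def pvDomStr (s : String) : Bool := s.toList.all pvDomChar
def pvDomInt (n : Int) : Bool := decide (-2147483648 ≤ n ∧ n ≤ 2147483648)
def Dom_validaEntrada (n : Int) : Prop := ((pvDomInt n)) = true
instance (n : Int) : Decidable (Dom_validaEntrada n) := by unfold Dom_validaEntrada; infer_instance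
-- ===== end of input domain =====

-- B replaces A's per-character loop with count>3 early-returns by one closed-form
-- test (length 4 and the character set has size ≠ 1); objective: simpler.


-- ===== PORT A =====
-- the 'for i in n: if n.count(i) > 3: return False' loop; s is the full string's chars
def validaEntradaLoop (s : List Char) : List Char → Bool
  | [] => true
  | i :: rest => if s.count i > 3 then false else validaEntradaLoop s rest

def validaEntrada (n : Int) : Bool :=
  let s := PySem.Int.toChars n
  if s.length = 4 then validaEntradaLoop s s
  else false

-- ===== PORT B =====
def validaEntrada_alt (n : Int) : Bool :=
  let s := PySem.Int.toChars n
  s.length == 4 && PySem.Set.len (PySem.Set.ofList s) != 1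

-- ===== PRECONDITION & SPEC =====
def Spec_validaEntrada (n : Int) (out : Bool) : Prop := out = validaEntrada_alt n
instance (n : Int) (out : Bool) : Decidable (Spec_validaEntrada n out) := by unfold Spec_validaEntrada; infer_instance

-- ===== CLAIM (what is proved, stated in full; the proofs are below) =====
def Claim_equal_validaEntrada : Prop := ∀ (n : Int), Dom_validaEntrada n → Spec_validaEntrada n (validaEntrada n)

-- ===== LEMMAS AND PROOFS =====

-- On a 4-character string, count i > 3 ⇔ all four characters equal i.
theorem loop_eq_set (a b c d : Char) :
    validaEntradaLoop [a,b,c,d] [a,b,c,d]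
      = (PySem.Set.len (PySem.Set.ofList [a,b,c,d]) != 1) := by
  by_cases hb : b = a <;> by_cases hc : c = a <;> by_cases hd : d = a <;>
    by_cases hcb : c = b <;> by_cases hdb : d = b <;> by_cases hdc : d = c <;>
    subst_vars <;>
    simp_all [validaEntradaLoop, PySem.Set.len, PySem.Set.ofList, PySem.Set.add,
      PySem.Set.contains, List.foldl, eq_comm]

-- ===== VERDICT (by name: the statement is the Claim_ definition above) =====
theorem validaEntrada_spec : Claim_equal_validaEntrada := by
  intro n _
  unfold Spec_validaEntrada validaEntrada validaEntrada_alt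
  set s := PySem.Int.toChars n with hs
  by_cases h4 : s.length = 4
  · match s, h4 with
    | [a,b,c,d], _ => simp [loop_eq_set a b c d]
  · simp [h4]
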